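-- pv_equiv track=rewrite | github.com/Siirl/disenio | primer lab/Diseño_primero_corto.py | arreglarLista
-- ===== SOURCE A (Python) =====
-- def arreglarLista(lista,numeeee):
--     result = []
--     grupos = []
--
--     # Divide cada número en dígitos y almacénalos en la lista 'result'
--     for number in lista:
--         number_str = str(number)
--         result.extend(map(str, number_str))
--
--     # Invierte la lista resultante
--     lista2 = result[::-1]
--     # Agrupa en grupos de 3
--     for i in range(0, len(lista2), numeeee):  # Cambio de 2 a 3 aquí
--         grupo = lista2[i:i + numeeee]
--         grupos.append(str(''.join(map(str, grupo))))
--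
--     # Invierte nuevamente cada número en los grupos
--     grup = [int(str(num)[::-1]) for num in grupos]
--
--     return grup
-- ===== SOURCE B (Python) =====
-- def arreglarLista(lista, numeeee):
--     # One pass from the right end of the concatenated digit string:
--     # no reversal passes, no intermediate group list.
--     s = ''.join(str(n) for n in lista)
--     grup = []
--     for i in range(len(s), 0, -numeeee):
--         grup.append(int(s[max(0, i - numeeee):i]))
--     return grup
-- ===== Notes on version B (the rewrite author's own statement) =====
-- stated objective: simpler
-- what changed: B joins the digits once and emits int(s[max(0,i-numeeee):i]) while walking chunk starts from the right end, replacing A's three passes (reverse the digit list, chunk it, reverse each chunk back) and its intermediate group list with a single right-to-left slicing loop.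
import Mathlib
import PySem

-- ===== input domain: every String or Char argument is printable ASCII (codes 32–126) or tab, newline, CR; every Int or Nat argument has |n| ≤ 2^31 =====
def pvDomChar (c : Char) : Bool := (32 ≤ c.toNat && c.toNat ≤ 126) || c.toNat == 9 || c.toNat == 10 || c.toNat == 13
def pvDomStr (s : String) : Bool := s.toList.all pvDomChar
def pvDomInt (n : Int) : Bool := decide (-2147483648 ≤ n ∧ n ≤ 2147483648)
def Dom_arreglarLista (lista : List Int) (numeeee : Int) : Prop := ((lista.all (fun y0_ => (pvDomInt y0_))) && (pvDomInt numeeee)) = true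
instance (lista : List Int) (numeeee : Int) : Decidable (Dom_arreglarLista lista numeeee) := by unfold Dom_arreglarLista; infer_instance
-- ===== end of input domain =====

-- B replaces A's three passes (reverse all digits, chunk, reverse each chunk) by one
-- right-to-left pass of right-anchored slices over the joined digit string (objective: simpler).

-- ===== PORT A =====
-- digits are kept as List Char: Python's map(str, number_str) maps str over
-- 1-char strings, which is the identity, and ''.join restores the string.
def arreglarLista (lista : List Int) (numeeee : Int) : List Int :=
  let result : List Char :=
    lista.foldl (fun acc number => acc ++ PySem.Int.toChars number) []
  -- lista2 = result[::-1]; step -1 never raises, so getD [] is never the fallback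
  let lista2 : List Char := (PySem.List.slice? result none none (-1)).getD []
  let grupos : List (List Char) :=
    (PySem.List.pyRange 0 (lista2.length : Int) numeeee).foldl
      (fun gs i => gs ++ [PySem.List.slice lista2 (some i) (some (i + numeeee))]) []
  -- int(str(num)[::-1]); ofChars? = none is int's ValueError, excluded by Pre_
  grupos.map (fun num => (PySem.Int.ofChars? num.reverse).getD 0)

-- ===== PORT B =====
def arreglarLista_alt (lista : List Int) (numeeee : Int) : List Int :=
  let s : List Char := (lista.map PySem.Int.toChars).flatten
  (PySem.List.pyRange (s.length : Int) 0 (-numeeee)).foldl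
    (fun gs i =>
      gs ++ [(PySem.Int.ofChars? (PySem.List.slice s (some (max 0 (i - numeeee))) (some i))).getD 0])
    []

-- ===== PRECONDITION & SPEC =====
-- helper for Pre_: (total digit length of lista, positions of the '-' signs in the joined digit string)
def pvSignPos (lista : List Int) : Int × List Int :=
  lista.foldl
    (fun st n =>
      (st.1 + ((PySem.Int.toChars n).length : Int), if n < 0 then st.2 ++ [st.1] else st.2))
    (0, [])

-- Pre_ excludes exactly the inputs where Python A raises: numeeee = 0 (range step zero,
-- ValueError) and, for numeeee > 0, lists with a negative number whose '-' sign does not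
-- land as the first character of a chunk of length ≥ 2 (int() ValueError); for numeeee < 0
-- no chunk is formed and A returns [].  (In the Lean ports both raising cases reduce to
-- the same getD defaults, so ports_eq below holds on every input; Pre_ marks where the
-- PYTHON programs return normally.)
def Pre_arreglarLista (lista : List Int) (numeeee : Int) : Prop :=
  numeeee ≠ 0 ∧
  (0 < numeeee →
    ∀ p ∈ (pvSignPos lista).2,
      (p = 0 ∨ ((pvSignPos lista).1 - p) % numeeee = 0) ∧
      (if p = 0 then
         (if (pvSignPos lista).1 % numeeee = 0 then 2 ≤ numeeee
          else 2 ≤ (pvSignPos lista).1 % numeeee)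
       else 2 ≤ numeeee))
instance (lista : List Int) (numeeee : Int) : Decidable (Pre_arreglarLista lista numeeee) := by
  unfold Pre_arreglarLista; infer_instance

def pvWitness_arreglarLista : List Int × Int := ([12, -3], 2)

def Spec_arreglarLista (lista : List Int) (numeeee : Int) (out : List Int) : Prop := out = arreglarLista_alt lista numeeee
instance (lista : List Int) (numeeee : Int) (out : List Int) : Decidable (Spec_arreglarLista lista numeeee out) := by unfold Spec_arreglarLista; infer_instance

-- ===== CLAIM (what is proved, stated in full; the proofs are below) =====
def Claim_equal_arreglarLista : Prop := ∀ (lista : List Int) (numeeee : Int), Dom_arreglarLista lista numeeee → Pre_arreglarLista lista numeeee → Spec_arreglarLista lista numeeee (arreglarLista lista numeeee)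

-- ===== LEMMAS AND PROOFS =====

lemma rev_chunk (ds : List Char) (a n : Nat) :
    ((ds.reverse.drop a).take n).reverse
      = (ds.drop (ds.length - a - n)).take ((ds.length - a) - (ds.length - a - n)) := by
  rw [List.drop_reverse, List.take_reverse, List.reverse_reverse, List.length_take,
      List.drop_take]
  have h : min (ds.length - a) ds.length = ds.length - a := by omega
  rw [h]

lemma elt_eq (ds : List Char) (k : Int) (hk : 0 < k) (j : Nat)
    (hj : j < ((((ds.length:Int)) - 0 + k - 1)/k).toNat) :
    (PySem.List.slice ds.reverse (some (0 + k * (j:Int))) (some (0 + k * (j:Int) + k))).reverse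
      = PySem.List.slice ds (some (max 0 (((ds.length:Int)) + -k * (j:Int) - k)))
          (some (((ds.length:Int)) + -k * (j:Int))) := by
  set L := ds.length with hL
  set knat := k.toNat with hknat
  have hkk : k = (knat : Int) := by omega
  -- j < ceil(L/k)  ⇒  knat*j < L
  have hjk : knat * j < L := by
    have hm : (0:Int) < ((L:Int) - 0 + k - 1)/k := by
      rcases le_or_gt (((L:Int) - 0 + k - 1)/k) 0 with h | h
      · exfalso
        have : ((((L:Int)) - 0 + k - 1)/k).toNat = 0 := by omega
        omega
      · exact h
    have h1 : ((j:Int) + 1) ≤ ((L:Int) - 0 + k - 1)/k := by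
      have := hj
      omega
    rw [Int.le_ediv_iff_mul_le hk, add_mul, one_mul] at h1
    have h2 : (j:Int) * k + k ≤ (L:Int) + k - 1 := by linarith
    have h3 : ((knat * j : Nat) : Int) = (j:Int) * k := by push_cast [hkk]; ring
    omega
  have eA1 : (0:Int) + k * (j:Int) = ((knat * j : Nat) : Int) := by push_cast [hkk]; ring
  have eA2 : (0:Int) + k * (j:Int) + k = ((knat * j : Nat) : Int) + ((knat : Nat) : Int) := by
    push_cast [hkk]; ring
  rw [eA2, eA1, PySem.List.slice_natCast_add, rev_chunk]
  have h3 : -k * (j:Int) = -(((knat * j : Nat)) : Int) := by push_cast [hkk]; ring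
  have eB1 : max 0 (((L:Int)) + -k * (j:Int) - k) = ((L - knat * j - knat : Nat) : Int) := by
    rw [h3, hkk]; omega
  have eB2 : ((L:Int)) + -k * (j:Int) = ((L - knat * j : Nat) : Int) := by
    rw [h3]; omega
  rw [eB1, eB2, PySem.List.slice_natCast]

-- the two ports agree on every input (for numeeee = 0 both ranges are empty)
lemma ports_eq (lista : List Int) (k : Int) :
    arreglarLista lista k = arreglarLista_alt lista k := by
  unfold arreglarLista arreglarLista_alt
  dsimp only
  rw [PySem.List.foldl_append_singleton_eq_map, PySem.List.foldl_append_singleton_eq_map,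
      PySem.List.foldl_append_eq_flatMap, List.nil_append, List.nil_append, List.nil_append,
      List.flatMap_def, PySem.List.slice?_none_none_neg_one, Option.getD_some, List.map_map]
  set ds : List Char := (lista.map PySem.Int.toChars).flatten with hds
  rw [List.length_reverse]
  rcases lt_trichotomy k 0 with hk | hk | hk
  · -- k < 0 : both ranges are empty
    have h1 : PySem.List.pyRange 0 ((ds.length : Int)) k = [] := by
      simp only [PySem.List.pyRange]
      rw [if_neg (by omega : ¬ k = 0), if_neg (by omega : ¬ (0:Int) < k),
          if_neg (by omega : ¬ ((ds.length : Int)) < 0)]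
      rfl
    have h2 : PySem.List.pyRange ((ds.length : Int)) 0 (-k) = [] := by
      simp only [PySem.List.pyRange]
      rw [if_neg (by omega : ¬ -k = 0), if_pos (by omega : (0:Int) < -k),
          if_neg (by omega : ¬ ((ds.length : Int)) < 0)]
      rfl
    rw [h1, h2]
    rfl
  · subst hk
    simp [PySem.List.pyRange]
  · -- k > 0 : both ranges enumerate the same chunk count; chunks match by elt_eq
    set L := ds.length with hL
    have hcA := PySem.List.pyRange_of_pos 0 ((L : Int)) hk
    have hcB : PySem.List.pyRange ((L : Int)) 0 (-k)
        = List.map (fun j : Nat => ((L : Int)) + -k * (j : Int))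
            (List.range (if (0:Int) < ((L : Int)) then ((((L : Int)) - 0 + k - 1) / k).toNat else 0)) := by
      simp only [PySem.List.pyRange]
      rw [if_neg (by omega : ¬ -k = 0), if_neg (by omega : ¬ (0:Int) < -k), neg_neg]
    rw [hcA, hcB, List.map_map, List.map_map]
    refine List.map_congr_left ?_
    intro j hj
    rw [List.mem_range] at hj
    have hj' : j < ((((L : Int)) - 0 + k - 1) / k).toNat := by
      split_ifs at hj
      · exact hj
      · omega
    simp only [Function.comp_apply]
    rw [elt_eq ds k hk j hj']

-- ===== VERDICT (by name: the statement is the Claim_ definition above) =====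
theorem arreglarLista_spec : Claim_equal_arreglarLista := by
  intro lista k _ _
  unfold Spec_arreglarLista
  exact ports_eq lista k
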